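-- pv_equiv track=rewrite | github.com/itsbth/technopolis-menu | technopolis_menu/extractor.py | parse_menu_simple
-- ===== SOURCE A (Python) =====
-- DAYS = ("mandag", "tirsdag", "onsdag", "torsdag", "fredag")
--
-- def parse_menu_simple(menu: str):
--     days = {day: [] for day in DAYS}
--     menu = menu.split("\n\n")
--     day = None
--     for line in menu:
--         if line.lower() in DAYS:
--             day = line.lower()
--         elif day and line:
--             days[day].append(line.strip())
--     return days
-- ===== SOURCE B (Python) =====
-- DAYS = ("mandag", "tirsdag", "onsdag", "torsdag", "fredag")
--
-- def parse_menu_simple(menu: str):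
--     days = {day: [] for day in DAYS}
--
--     def go(blocks):
--         # skip blocks before the next header
--         while blocks and blocks[0].lower() not in DAYS:
--             blocks = blocks[1:]
--         if not blocks:
--             return
--         day = blocks[0].lower()
--         rest = blocks[1:]
--         seg = []
--         while rest and rest[0].lower() not in DAYS:
--             seg.append(rest[0])
--             rest = rest[1:]
--         days[day].extend(b.strip() for b in seg if b)
--         go(rest)
--
--     go(menu.split("\n\n"))
--     return days
-- ===== Notes on version B (the rewrite author's own statement) =====
-- stated objective: alternative
-- what changed: Replaces A's single-pass state machine (current-day variable updated per block) by a recursive segmentation: skip to the next header, split off that day's whole segment, and extend the day's list once per segment.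
import Mathlib
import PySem

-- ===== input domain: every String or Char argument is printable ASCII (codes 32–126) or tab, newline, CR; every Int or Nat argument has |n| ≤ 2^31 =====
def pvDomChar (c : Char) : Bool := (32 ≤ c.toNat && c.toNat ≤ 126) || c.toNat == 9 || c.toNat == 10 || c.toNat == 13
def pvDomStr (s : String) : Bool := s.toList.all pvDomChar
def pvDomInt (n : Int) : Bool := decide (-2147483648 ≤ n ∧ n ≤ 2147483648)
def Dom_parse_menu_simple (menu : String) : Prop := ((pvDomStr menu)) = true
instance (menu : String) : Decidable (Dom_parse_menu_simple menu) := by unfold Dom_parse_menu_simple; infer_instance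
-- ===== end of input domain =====

-- B replaces A's one-pass current-day state machine by a recursive segmentation (skip to a
-- header, take its whole segment, extend that day's list once); objective: alternative
-- decomposition, same cost. A returns a dict it builds; equivalence is about the return value.

def pvDAYS : List String := ["mandag", "tirsdag", "onsdag", "torsdag", "fredag"]

-- ===== PORT A =====
-- days = {day: [] for day in DAYS}
def pvInit : PySem.Dict String (List String) :=
  PySem.Dict.ofList (pvDAYS.map (fun d => (d, [])))

-- the body of A's for-loop; state = (day, days)
def pvStepA (st : Option String × PySem.Dict String (List String)) (line : String) :
    Option String × PySem.Dict String (List String) :=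
  if pvDAYS.contains (PySem.Str.lower line) then (some (PySem.Str.lower line), st.2)
  else match st.1 with
    | some d =>  -- 'elif day and line': a string is truthy iff non-empty
        if d ≠ "" ∧ line ≠ "" then
          (st.1, st.2.modify d [] (fun v => v ++ [PySem.Str.strip line]))
        else st
    | none => st

def parse_menu_simple (menu : String) : List (String × List String) :=
  -- menu.split("\n\n"): the separator is non-empty, so split? is always some
  ((((PySem.Str.split? menu "\n\n").getD []).foldl pvStepA (none, pvInit))).2.items

-- ===== PORT B =====
-- the first while loop of go: drop blocks until one is a header
def pvSkip : List String → List String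
  | [] => []
  | b :: bs => if pvDAYS.contains (PySem.Str.lower b) then b :: bs else pvSkip bs

-- the second while loop of go: split off the segment up to the next header
def pvSeg : List String → List String × List String
  | [] => ([], [])
  | b :: bs =>
      if pvDAYS.contains (PySem.Str.lower b) then ([], b :: bs)
      else (b :: (pvSeg bs).1, (pvSeg bs).2)

-- length facts cited by pvGo's termination proof
theorem pvSkip_length_le (l : List String) : (pvSkip l).length ≤ l.length := by
  induction l with
  | nil => simp [pvSkip]
  | cons b bs ih =>
      simp only [pvSkip]
      split
      · simp
      · simp; omega

theorem pvSeg_snd_length_le (l : List String) : (pvSeg l).2.length ≤ l.length := by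
  induction l with
  | nil => simp [pvSeg]
  | cons b bs ih =>
      simp only [pvSeg]
      split
      · simp
      · simp; omega

def pvGo (days : PySem.Dict String (List String)) (blocks : List String) :
    PySem.Dict String (List String) :=
  match hs : pvSkip blocks with
  | [] => days
  | b :: bs =>
      pvGo (days.modify (PySem.Str.lower b) []
              (fun v => v ++ ((pvSeg bs).1.filter (fun x => x ≠ "")).map PySem.Str.strip))
        (pvSeg bs).2
termination_by blocks.length
decreasing_by
  have h1 : (b :: bs).length ≤ blocks.length := hs ▸ pvSkip_length_le blocks
  have h2 : (pvSeg bs).2.length ≤ bs.length := pvSeg_snd_length_le bs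
  simp at h1; omega

def parse_menu_simple_alt (menu : String) : List (String × List String) :=
  -- menu.split("\n\n"): the separator is non-empty, so split? is always some
  (pvGo pvInit ((PySem.Str.split? menu "\n\n").getD [])).items

-- ===== PRECONDITION & SPEC =====
def Spec_parse_menu_simple (menu : String) (out : List (String × List String)) : Prop := out = parse_menu_simple_alt menu
instance (menu : String) (out : List (String × List String)) : Decidable (Spec_parse_menu_simple menu out) := by unfold Spec_parse_menu_simple; infer_instance

-- ===== CLAIM (what is proved, stated in full; the proofs are below) =====
def Claim_equal_parse_menu_simple : Prop := ∀ (menu : String), Dom_parse_menu_simple menu → Spec_parse_menu_simple menu (parse_menu_simple menu)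

-- ===== LEMMAS AND PROOFS =====

theorem pvGo_nil (days : PySem.Dict String (List String)) (blocks : List String)
    (h : pvSkip blocks = []) : pvGo days blocks = days := by
  rw [pvGo]; split <;> simp_all

theorem pvGo_cons (days : PySem.Dict String (List String)) (blocks : List String)
    (b : String) (bs : List String) (h : pvSkip blocks = b :: bs) :
    pvGo days blocks =
      pvGo (days.modify (PySem.Str.lower b) []
              (fun v => v ++ ((pvSeg bs).1.filter (fun x => x ≠ "")).map PySem.Str.strip))
        (pvSeg bs).2 := by
  rw [pvGo]; split <;> simp_all

theorem pv_modify_nil (D : PySem.Dict String (List String)) (k : String)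
    (hnd : D.keys.Nodup) (hc : D.contains k = true) :
    D.modify k [] (fun v => v ++ []) = D := by
  have : D.modify k [] (fun v => v ++ []) = D.insert k (D.getD k []) := by
    simp [PySem.Dict.modify]
  rw [this]
  apply PySem.Dict.ext
  rw [PySem.Dict.items_insert_of_contains D _ hc]
  have : ∀ p ∈ D.items, (if (p.1 == k) = true then (k, D.getD k []) else p) = id p := by
    intro p hp
    by_cases hpk : (p.1 == k) = true
    · have hk : p.1 = k := by simpa using hpk
      have : (k, p.2) ∈ D.items := by rw [← hk]; exact hp
      have := PySem.Dict.getD_of_mem_items D this hnd []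
      rw [hk, this, ← hk]
      simp
    · simp [hpk]
  rw [List.map_congr_left this, List.map_id]

theorem pv_modify_modify (D : PySem.Dict String (List String)) (k : String)
    (x y : List String) :
    (D.modify k [] (fun v => v ++ x)).modify k [] (fun v => v ++ y)
      = D.modify k [] (fun v => v ++ (x ++ y)) := by
  simp [PySem.Dict.modify, PySem.Dict.getD_insert_self, PySem.Dict.insert_insert_self,
    List.append_assoc]

theorem pv_keys_modify_of_contains (D : PySem.Dict String (List String)) (k : String)
    (f : List String → List String) (hc : D.contains k = true) :
    (D.modify k [] f).keys = D.keys := by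
  rw [PySem.Dict.keys_modify, PySem.Dict.keys_insert_of_contains _ _ hc]

theorem pv_days_nodup : pvDAYS.Nodup := by decide

theorem pvL2 (bs : List String) : ∀ (day : String) (D : PySem.Dict String (List String)),
    D.keys = pvDAYS → day ∈ pvDAYS →
    (bs.foldl pvStepA (some day, D)).2
      = pvGo (D.modify day [] (fun v => v ++ ((pvSeg bs).1.filter (fun x => x ≠ "")).map PySem.Str.strip))
          (pvSeg bs).2 := by
  induction bs with
  | nil =>
      intro day D hk hday
      rw [pvGo_nil _ _ rfl]
      simp only [List.foldl_nil, pvSeg, List.filter_nil, List.map_nil]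
      exact (pv_modify_nil D day (hk ▸ pv_days_nodup)
        ((PySem.Dict.contains_iff_mem_keys D day).2 (hk ▸ hday))).symm
  | cons b rest ih =>
      intro day D hk hday
      have hcont : D.contains day = true :=
        (PySem.Dict.contains_iff_mem_keys D day).2 (hk ▸ hday)
      by_cases hb : PySem.Str.lower b ∈ pvDAYS
      · -- header block: A switches day; B starts a fresh segment here
        rw [List.foldl_cons, show pvStepA (some day, D) b = (some (PySem.Str.lower b), D) by
          simp [pvStepA, hb]]
        rw [show pvSeg (b :: rest) = ([], b :: rest) by simp [pvSeg, hb]]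
        simp only [List.filter_nil, List.map_nil]
        rw [pv_modify_nil D day (hk ▸ pv_days_nodup) hcont]
        rw [pvGo_cons _ (b :: rest) b rest (by simp [pvSkip, hb])]
        exact ih (PySem.Str.lower b) D hk hb
      · -- non-header block
        have hday' : day ≠ "" := by
          intro h; subst h; simp [pvDAYS] at hday
        rw [show pvSeg (b :: rest) = (b :: (pvSeg rest).1, (pvSeg rest).2) by simp [pvSeg, hb]]
        by_cases hne : b = ""
        · -- empty block: A skips it, B filters it out
          subst hne
          rw [List.foldl_cons, show pvStepA (some day, D) "" = (some day, D) by
            simp [pvStepA, hb]]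
          rw [ih day D hk hday]
          simp
        · -- non-empty block inside the segment
          rw [List.foldl_cons, show pvStepA (some day, D) b
              = (some day, D.modify day [] (fun v => v ++ [PySem.Str.strip b])) by
            simp [pvStepA, hb, hday', hne]]
          have hk' : (D.modify day [] (fun v => v ++ [PySem.Str.strip b])).keys = pvDAYS := by
            rw [pv_keys_modify_of_contains _ _ _ hcont]; exact hk
          rw [ih day _ hk' hday, pv_modify_modify]
          simp [hne]

theorem pvL1 (blocks : List String) : ∀ (D : PySem.Dict String (List String)),
    D.keys = pvDAYS →
    (blocks.foldl pvStepA (none, D)).2 = pvGo D blocks := by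
  induction blocks with
  | nil => intro D hk; rw [pvGo_nil _ _ rfl]; simp
  | cons b bs ih =>
      intro D hk
      by_cases hb : PySem.Str.lower b ∈ pvDAYS
      · rw [List.foldl_cons, show pvStepA (none, D) b = (some (PySem.Str.lower b), D) by
          simp [pvStepA, hb]]
        rw [pvL2 bs (PySem.Str.lower b) D hk hb]
        rw [pvGo_cons _ (b :: bs) b bs (by simp [pvSkip, hb])]
      · rw [List.foldl_cons, show pvStepA (none, D) b = (none, D) by simp [pvStepA, hb]]
        rw [ih D hk]
        -- pvSkip agrees on b :: bs and bs, so pvGo does too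
        have hs : pvSkip (b :: bs) = pvSkip bs := by simp [pvSkip, hb]
        cases hrest : pvSkip bs with
        | nil => rw [pvGo_nil _ _ (hs.trans hrest), pvGo_nil _ _ hrest]
        | cons c cs => rw [pvGo_cons _ _ c cs (hs.trans hrest), pvGo_cons _ _ c cs hrest]

theorem pvInit_keys : pvInit.keys = pvDAYS := by decide

-- ===== VERDICT (by name: the statement is the Claim_ definition above) =====
theorem parse_menu_simple_spec : Claim_equal_parse_menu_simple := by
  intro menu _
  unfold Spec_parse_menu_simple parse_menu_simple parse_menu_simple_alt
  rw [pvL1 _ pvInit pvInit_keys]
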